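-- pv_equiv track=rewrite | github.com/Toma1345/SAE_Graphe | requetes.py | nettoyageNoms
-- ===== SOURCE A (Python) =====
-- def nettoyageNoms(liste_noms):
--     """Fonction clarifiant les noms d'une liste de noms en supprimant les caractères inutiles
--
--     Args:
--         liste_noms (list): liste des noms à nettoyer
--
--     Returns:
--         dict : liste des noms sans les caractères parasites
--     """
--     nettoyes = []
--     for nom in liste_noms:
--         sansCrochets = nom.replace('[', '').replace(']', '').replace("'", '')
--         index = len(sansCrochets)
--         if "(" in sansCrochets:
--             index = min(index, sansCrochets.index("("))
--         if "<" in sansCrochets: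
--             index = min(index, sansCrochets.index("<"))
--         if "|" in sansCrochets:
--             index = min(index, sansCrochets.index("|"))
--         propre = sansCrochets[:index]
--         nettoyes.append(propre.strip())
--     return nettoyes
-- ===== SOURCE B (Python) =====
-- def nettoyageNoms(liste_noms):
--     """Single character-level pass per name: skip '[', ']', "'", stop at the
--     first '(', '<' or '|', then strip — instead of three replace passes plus
--     three membership/index scans and a slice."""
--     nettoyes = []
--     for nom in liste_noms:
--         kept = []
--         for c in nom:
--             if c in '(<|':
--                 break
--             if c not in "[]'":
--                 kept.append(c)
--         nettoyes.append(''.join(kept).strip())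
--     return nettoyes
-- ===== Notes on version B (the rewrite author's own statement) =====
-- stated objective: alternative
-- what changed: Replaces the three replace passes plus three membership tests, three index scans and a slice by a single left-to-right character scan per name that skips removable characters and breaks at the first stop character.
import Mathlib
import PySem

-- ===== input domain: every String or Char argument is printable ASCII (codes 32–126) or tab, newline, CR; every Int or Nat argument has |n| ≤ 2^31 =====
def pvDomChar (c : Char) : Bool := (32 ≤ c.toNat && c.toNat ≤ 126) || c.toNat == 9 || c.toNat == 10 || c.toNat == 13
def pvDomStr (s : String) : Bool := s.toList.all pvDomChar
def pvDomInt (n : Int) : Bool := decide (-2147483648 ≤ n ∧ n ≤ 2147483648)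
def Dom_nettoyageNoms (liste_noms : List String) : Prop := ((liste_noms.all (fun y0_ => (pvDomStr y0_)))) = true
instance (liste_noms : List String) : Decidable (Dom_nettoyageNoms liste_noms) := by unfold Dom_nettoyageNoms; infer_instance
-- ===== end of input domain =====

-- B replaces A's three replace passes + three membership/index scans + slice by one
-- left-to-right character scan per name (alternative decomposition, same cost).


-- ===== PORT A =====
-- per-name body of A's loop; 'sansCrochets.index(c)' is ported as PySem.Str.find,
-- exact here because each use is guarded by the corresponding 'c in sansCrochets'
def pvCleanA (nom : String) : String :=
  let sansCrochets := PySem.Str.replace (PySem.Str.replace (PySem.Str.replace nom "[" "") "]" "") "'" ""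
  let index0 : Int := PySem.Str.len sansCrochets
  let index1 : Int := if PySem.Str.isIn "(" sansCrochets then min index0 (PySem.Str.find sansCrochets "(") else index0
  let index2 : Int := if PySem.Str.isIn "<" sansCrochets then min index1 (PySem.Str.find sansCrochets "<") else index1
  let index3 : Int := if PySem.Str.isIn "|" sansCrochets then min index2 (PySem.Str.find sansCrochets "|") else index2
  PySem.Str.strip (PySem.Str.slice sansCrochets none (some index3))

def nettoyageNoms (liste_noms : List String) : List String :=
  liste_noms.foldl (fun nettoyes nom => nettoyes ++ [pvCleanA nom]) []

-- ===== PORT B =====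
def pvIsStop (c : Char) : Bool := c == '(' || c == '<' || c == '|'   -- c in '(<|'
def pvIsRem (c : Char) : Bool := c == '[' || c == ']' || c == '\''   -- c in "[]'"

-- B's inner loop: kept accumulator, break at stop char, skip removable chars
def pvScanGo (kept : List Char) : List Char → List Char
  | [] => kept
  | c :: t =>
      if pvIsStop c then kept
      else if pvIsRem c then pvScanGo kept t
      else pvScanGo (kept ++ [c]) t

def pvCleanB (nom : String) : String :=
  PySem.Str.strip (String.ofList (pvScanGo [] nom.toList))

def nettoyageNoms_alt : List String → List String
  | [] => []
  | nom :: rest => pvCleanB nom :: nettoyageNoms_alt rest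

-- ===== PRECONDITION & SPEC =====
def Spec_nettoyageNoms (liste_noms : List String) (out : List String) : Prop := out = nettoyageNoms_alt liste_noms
instance (liste_noms : List String) (out : List String) : Decidable (Spec_nettoyageNoms liste_noms out) := by unfold Spec_nettoyageNoms; infer_instance

-- ===== CLAIM (what is proved, stated in full; the proofs are below) =====
def Claim_equal_nettoyageNoms : Prop := ∀ (liste_noms : List String), Dom_nettoyageNoms liste_noms → Spec_nettoyageNoms liste_noms (nettoyageNoms liste_noms)

-- ===== LEMMAS AND PROOFS =====

-- replace of one character by '' is a filter
lemma pv_replace_go_single (c : Char) : ∀ (l : List Char) (fuel : Nat) (acc : List Char),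
    l.length ≤ fuel →
    PySem.Chars.replace.go [c] [] fuel l acc = acc.reverse ++ l.filter (fun d => !(d == c)) := by
  intro l
  induction l with
  | nil => intro fuel acc _; cases fuel <;> simp [PySem.Chars.replace.go]
  | cons a t ih =>
      intro fuel acc hle
      cases fuel with
      | zero => simp at hle
      | succ f =>
          simp only [PySem.Chars.replace.go]
          by_cases hac : c = a
          · subst hac
            simp [List.isPrefixOf, ih f acc (by simpa using hle)]
          · have : ([c].isPrefixOf (a :: t)) = false := by
              simp [List.isPrefixOf, hac]
            simp only [this, Bool.false_eq_true, if_false]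
            rw [ih f (a :: acc) (by simpa using hle)]
            simp [Ne.symm hac]

lemma pv_replace_single (c : Char) (l : List Char) :
    PySem.Chars.replace l [c] [] = l.filter (fun d => !(d == c)) := by
  simp [PySem.Chars.replace, pv_replace_go_single c l l.length [] le_rfl]

-- find of one character
lemma pv_find_go_single (c : Char) : ∀ (l : List Char) (k : Nat),
    PySem.Chars.find.go [c] l k =
      if c ∈ l then ((k + l.findIdx (fun d => d == c) : Nat) : Int) else -1 := by
  intro l
  induction l with
  | nil => intro k; simp [PySem.Chars.find.go]
  | cons a t ih =>
      intro k
      simp only [PySem.Chars.find.go]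
      by_cases hac : c = a
      · subst hac
        simp [List.isPrefixOf, List.findIdx_cons]
      · have hpre : ([c].isPrefixOf (a :: t)) = false := by
          simp [List.isPrefixOf, hac]
        simp only [hpre, Bool.false_eq_true, if_false]
        rw [ih (k + 1)]
        have hne : (a == c) = false := by simp [Ne.symm hac]
        simp only [List.mem_cons, List.findIdx_cons, hne, cond_false]
        by_cases hmem : c ∈ t
        · simp only [hmem, if_true, or_true]
          push_cast; ring
        · simp [hmem, hac]

lemma pv_find_single (c : Char) (l : List Char) :
    PySem.Chars.find l [c] =
      if c ∈ l then ((l.findIdx (fun d => d == c) : Nat) : Int) else -1 := by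
  simp [PySem.Chars.find, pv_find_go_single]

lemma pv_isIn_single (c : Char) (l : List Char) :
    PySem.Chars.isIn [c] l = decide (c ∈ l) := by
  simp only [PySem.Chars.isIn, pv_find_single]
  by_cases hmem : c ∈ l
  · simp only [hmem, if_true]
    simp
  · simp [hmem]

-- B's scan = filter after takeWhile
lemma pv_scanGo_eq : ∀ (l acc : List Char),
    pvScanGo acc l = acc ++ (l.takeWhile (fun c => !pvIsStop c)).filter (fun c => !pvIsRem c) := by
  intro l
  induction l with
  | nil => intro acc; simp [pvScanGo]
  | cons a t ih =>
      intro acc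
      by_cases hs : pvIsStop a
      · simp [pvScanGo, hs]
      · by_cases hr : pvIsRem a
        · simp [pvScanGo, hs, hr, ih]
        · simp [pvScanGo, hs, hr, ih]

lemma pv_rem_not_stop (c : Char) (h : pvIsRem c = true) : pvIsStop c = false := by
  simp only [pvIsRem, Bool.or_eq_true, beq_iff_eq] at h
  rcases h with (h | h) | h <;> subst h <;> decide

-- removables are never stops, so filtering and cutting commute
lemma pv_filter_takeWhile_comm : ∀ (l : List Char),
    (l.filter (fun c => !pvIsRem c)).takeWhile (fun c => !pvIsStop c)
      = (l.takeWhile (fun c => !pvIsStop c)).filter (fun c => !pvIsRem c) := by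
  intro l
  induction l with
  | nil => simp
  | cons a t ih =>
      by_cases hr : pvIsRem a
      · have hs := pv_rem_not_stop a hr
        simp [hr, hs, ih]
      · by_cases hs : pvIsStop a
        · simp [hr, hs]
        · simp [hr, hs, ih]

-- A's three chained filters are one filter by !pvIsRem
lemma pv_filter_chain (l : List Char) :
    ((l.filter (fun d => !(d == '['))).filter (fun d => !(d == ']'))).filter (fun d => !(d == '\''))
      = l.filter (fun c => !pvIsRem c) := by
  simp only [List.filter_filter]
  congr 1
  funext c
  cases h1 : (c == '[') <;> cases h2 : (c == ']') <;> cases h3 : (c == '\'') <;>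
    simp [pvIsRem, h1, h2, h3]

-- A's computed index, as a standalone function of the filtered list
def pvIdxA (r : List Char) : Int :=
  let i0 : Int := r.length
  let i1 := if '(' ∈ r then min i0 ((r.findIdx (fun d => d == '(') : Nat) : Int) else i0
  let i2 := if '<' ∈ r then min i1 ((r.findIdx (fun d => d == '<') : Nat) : Int) else i1
  if '|' ∈ r then min i2 ((r.findIdx (fun d => d == '|') : Nat) : Int) else i2

lemma pv_idxA_eq : ∀ (r : List Char),
    pvIdxA r = ((r.takeWhile (fun c => !pvIsStop c)).length : Int) := by
  intro r
  induction r with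
  | nil => simp [pvIdxA]
  | cons a t ih =>
      by_cases hs : pvIsStop a
      · have ha : (a = '(' ∨ a = '<') ∨ a = '|' := by
          simp only [pvIsStop, Bool.or_eq_true, beq_iff_eq] at hs; tauto
        rcases ha with (h | h) | h <;> subst h <;>
          simp only [pvIdxA, List.mem_cons, List.findIdx_cons, List.takeWhile_cons,
            pvIsStop] <;>
          norm_num <;>
          (try split_ifs) <;> push_cast <;> omega
      · have h1 : (a == '(') = false := by
          simp only [pvIsStop, Bool.or_eq_true, beq_iff_eq] at hs; simp; tauto
        have h2 : (a == '<') = false := by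
          simp only [pvIsStop, Bool.or_eq_true, beq_iff_eq] at hs; simp; tauto
        have h3 : (a == '|') = false := by
          simp only [pvIsStop, Bool.or_eq_true, beq_iff_eq] at hs; simp; tauto
        have e1 : ¬ ('(' = a) := fun h => by simp [h.symm] at h1
        have e2 : ¬ ('<' = a) := fun h => by simp [h.symm] at h2
        have e3 : ¬ ('|' = a) := fun h => by simp [h.symm] at h3
        have hsf : pvIsStop a = false := by simpa using hs
        simp only [pvIdxA, List.mem_cons, List.findIdx_cons, List.takeWhile_cons,
          h1, h2, h3, hsf, cond_false, Bool.not_false, if_true, List.length_cons,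
          e1, e2, e3, false_or, Nat.cast_add, Nat.cast_one]
        have ih' := ih
        simp only [pvIdxA] at ih'
        split_ifs at ih' ⊢ <;> omega

-- per-name equality
lemma pv_clean_eq (nom : String) : pvCleanA nom = pvCleanB nom := by
  apply String.toList_inj.mp
  have hrep : (PySem.Str.replace (PySem.Str.replace (PySem.Str.replace nom "[" "") "]" "") "'" "").toList
      = nom.toList.filter (fun c => !pvIsRem c) := by
    simp only [PySem.Str.toList_replace]
    have h1 : ("[" : String).toList = ['['] := rfl
    have h2 : ("]" : String).toList = [']'] := rfl
    have h3 : ("'" : String).toList = ['\''] := rfl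
    have h0 : ("" : String).toList = [] := rfl
    rw [h1, h2, h3, h0, pv_replace_single, pv_replace_single, pv_replace_single,
      pv_filter_chain]
  set r := nom.toList.filter (fun c => !pvIsRem c) with hrdef
  have hidx : (let index0 : Int := PySem.Str.len (PySem.Str.replace (PySem.Str.replace (PySem.Str.replace nom "[" "") "]" "") "'" "");
      let index1 := if PySem.Str.isIn "(" (PySem.Str.replace (PySem.Str.replace (PySem.Str.replace nom "[" "") "]" "") "'" "") then min index0 (PySem.Str.find (PySem.Str.replace (PySem.Str.replace (PySem.Str.replace nom "[" "") "]" "") "'" "") "(") else index0;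
      let index2 := if PySem.Str.isIn "<" (PySem.Str.replace (PySem.Str.replace (PySem.Str.replace nom "[" "") "]" "") "'" "") then min index1 (PySem.Str.find (PySem.Str.replace (PySem.Str.replace (PySem.Str.replace nom "[" "") "]" "") "'" "") "<") else index1;
      if PySem.Str.isIn "|" (PySem.Str.replace (PySem.Str.replace (PySem.Str.replace nom "[" "") "]" "") "'" "") then min index2 (PySem.Str.find (PySem.Str.replace (PySem.Str.replace (PySem.Str.replace nom "[" "") "]" "") "'" "") "|") else index2)
      = pvIdxA r := by
    simp only [PySem.Str.len_eq, PySem.Str.isIn_eq, PySem.Str.find_eq, hrep, pvIdxA]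
    rw [show ("(" : String).toList = ['('] from rfl, show ("<" : String).toList = ['<'] from rfl,
      show ("|" : String).toList = ['|'] from rfl]
    simp only [pv_isIn_single, pv_find_single, decide_eq_true_eq]
    split_ifs <;> simp_all
  show (pvCleanA nom).toList = (pvCleanB nom).toList
  rw [pvCleanA, pvCleanB]
  simp only [PySem.Str.toList_strip]
  rw [hidx]
  rw [PySem.Str.toList_slice, hrep, pv_idxA_eq, PySem.Chars.slice_eq_listSlice,
    PySem.List.slice_to_natCast]
  have htake : (nom.toList.filter (fun c => !pvIsRem c)).take
      ((nom.toList.filter (fun c => !pvIsRem c)).takeWhile (fun c => !pvIsStop c)).length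
      = (nom.toList.filter (fun c => !pvIsRem c)).takeWhile (fun c => !pvIsStop c) :=
    (List.prefix_iff_eq_take.mp (List.takeWhile_prefix _)).symm
  rw [htake, String.toList_ofList, pv_scanGo_eq, pv_filter_takeWhile_comm]
  simp

lemma pv_A_map (l : List String) : nettoyageNoms l = l.map pvCleanA := by
  unfold nettoyageNoms
  rw [PySem.List.foldl_append_singleton_eq_map]
  simp

lemma pv_B_map (l : List String) : nettoyageNoms_alt l = l.map pvCleanB := by
  induction l with
  | nil => simp [nettoyageNoms_alt]
  | cons a t ih => simp [nettoyageNoms_alt, ih]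

-- ===== VERDICT (by name: the statement is the Claim_ definition above) =====
theorem nettoyageNoms_spec : Claim_equal_nettoyageNoms := by
  intro l _
  unfold Spec_nettoyageNoms
  rw [pv_A_map, pv_B_map]
  exact List.map_congr_left (fun nom _ => pv_clean_eq nom)
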